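-- pv_equiv track=rewrite | github.com/brokentelescope/CCC-Solutions | 03/CCC '03 S2 - Poetry.py | last_syl
-- ===== SOURCE A (Python) =====
-- def last_syl(word):
--     vowels = "aeiouAEIOU"
--
--     letters = 0
--     for x in range(len(word)):
--         if word[-(x+1)] in vowels:
--             break
--         else:
--             letters += 1
--
--     return word[-letters-1:].lower()
-- ===== SOURCE B (Python) =====
-- def last_syl(word):
--     # Lowercase once, then locate the last vowel with str.rfind and slice from it;
--     # if there is no vowel (rfind's all give -1) the whole lowercased word is returned.
--     w = word.lower()
--     i = max(w.rfind("a"), w.rfind("e"), w.rfind("i"), w.rfind("o"), w.rfind("u"))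
--     return w[i:] if i >= 0 else w
-- ===== Notes on version B (the rewrite author's own statement) =====
-- stated objective: idiomatic
-- what changed: Replaces the manual backward negative-index consonant-counting loop with five str.rfind substring searches on the lowercased word, taking the max as the last-vowel position and slicing from it.
import Mathlib
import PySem

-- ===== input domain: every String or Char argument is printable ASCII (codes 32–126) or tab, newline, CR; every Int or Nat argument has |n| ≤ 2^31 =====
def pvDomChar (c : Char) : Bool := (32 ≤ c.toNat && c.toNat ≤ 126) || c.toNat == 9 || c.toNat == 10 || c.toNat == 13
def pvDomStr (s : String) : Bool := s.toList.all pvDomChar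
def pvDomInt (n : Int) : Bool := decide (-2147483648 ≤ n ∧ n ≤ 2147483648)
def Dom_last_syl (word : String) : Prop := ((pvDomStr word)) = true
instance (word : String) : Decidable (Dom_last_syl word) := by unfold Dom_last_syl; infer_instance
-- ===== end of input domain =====

-- B replaces A's backward negative-index consonant-counting loop by lowering the word once,
-- locating the last vowel as the max of five str.rfind searches, and slicing from it (idiomatic, same cost).


-- ===== PORT A =====
-- the `for x in range(len(word)): if word[-(x+1)] in vowels: break else: letters += 1` loop;
-- `c in vowels` for the single character word[-(x+1)] is exactly list membership, ported as List.contains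
def lastSylLoop (w : List Char) (xs : List Int) (letters : Int) : Int :=
  match xs with
  | [] => letters
  | x :: rest =>
    if "aeiouAEIOU".toList.contains (PySem.List.pyGetD w (-(x + 1)) ' ') then letters
    else lastSylLoop w rest (letters + 1)

def last_syl (word : String) : String :=
  let letters := lastSylLoop word.toList (PySem.List.pyRange 0 (PySem.Str.len word) 1) 0
  PySem.Str.lower (PySem.Str.slice word (some (-letters - 1)) none)

-- ===== PORT B =====
def last_syl_alt (word : String) : String :=
  let w := PySem.Str.lower word
  let i := max (max (max (max (PySem.Str.rfind w "a") (PySem.Str.rfind w "e"))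
      (PySem.Str.rfind w "i")) (PySem.Str.rfind w "o")) (PySem.Str.rfind w "u")
  if 0 ≤ i then PySem.Str.slice w (some i) none else w

-- ===== PRECONDITION & SPEC =====
def Spec_last_syl (word : String) (out : String) : Prop := out = last_syl_alt word
instance (word : String) (out : String) : Decidable (Spec_last_syl word out) := by unfold Spec_last_syl; infer_instance

-- ===== CLAIM (what is proved, stated in full; the proofs are below) =====
def Claim_equal_last_syl : Prop := ∀ (word : String), Dom_last_syl word → Spec_last_syl word (last_syl word)

-- ===== LEMMAS AND PROOFS =====

-- the number of trailing non-vowels of l (A's `letters`)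
def pvT (l : List Char) : Nat :=
  (l.reverse.takeWhile (fun c => !("aeiouAEIOU".toList.contains c))).length

-- B's max-of-rfinds, on the list side
def pvVmax (m : List Char) : Int :=
  max (max (max (max (PySem.Chars.rfind m ['a']) (PySem.Chars.rfind m ['e']))
      (PySem.Chars.rfind m ['i'])) (PySem.Chars.rfind m ['o'])) (PySem.Chars.rfind m ['u'])

theorem char_toNat_inj (a b : Char) (h : a.toNat = b.toNat) : a = b := by
  rw [← Char.ofNat_toNat a, ← Char.ofNat_toNat b, h]

theorem mem_iff_toNat_mem (d : Char) (L : List Char) : d ∈ L ↔ d.toNat ∈ L.map Char.toNat := by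
  constructor
  · intro h; exact List.mem_map_of_mem h
  · intro h
    obtain ⟨e, he, hee⟩ := List.mem_map.mp h
    rwa [char_toNat_inj d e hee.symm]

-- lowercasing turns membership in "aeiouAEIOU" into membership in "aeiou"
theorem lowerChar_mem (c : Char) :
    (PySem.Chars.lowerChar c ∈ "aeiou".toList) ↔ c ∈ "aeiouAEIOU".toList := by
  have low : "aeiou".toList.map Char.toNat = [97, 101, 105, 111, 117] := by decide
  have al : "aeiouAEIOU".toList.map Char.toNat = [97, 101, 105, 111, 117, 65, 69, 73, 79, 85] := by
    decide
  simp only [PySem.Chars.lowerChar, PySem.Chars.isupper]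
  have hA : ('A' ≤ c) ↔ 65 ≤ c.toNat := by
    rw [Char.le_def, UInt32.le_iff_toNat_le]; constructor <;> intro h <;> exact h
  have hZ : (c ≤ 'Z') ↔ c.toNat ≤ 90 := by
    rw [Char.le_def, UInt32.le_iff_toNat_le]; constructor <;> intro h <;> exact h
  split_ifs with h
  · simp only [Bool.and_eq_true, decide_eq_true_eq] at h
    have h1 : 65 ≤ c.toNat := hA.mp h.1
    have h2 : c.toNat ≤ 90 := hZ.mp h.2
    have hval : (Char.ofNat (c.toNat + 32)).toNat = c.toNat + 32 := by
      rw [Char.toNat_ofNat, if_pos]; left; omega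
    rw [mem_iff_toNat_mem, mem_iff_toNat_mem, hval, low, al]
    simp only [List.mem_cons, List.not_mem_nil, or_false]
    omega
  · simp only [Bool.and_eq_true, decide_eq_true_eq, not_and_or] at h
    have hc : ¬(65 ≤ c.toNat ∧ c.toNat ≤ 90) := by
      rcases h with h | h
      · intro hh; exact h (hA.mpr hh.1)
      · intro hh; exact h (hZ.mpr hh.2)
    rw [mem_iff_toNat_mem, mem_iff_toNat_mem, low, al]
    simp only [List.mem_cons, List.not_mem_nil, or_false]
    omega

-- equation lemmas for PySem.Chars.rfind.go
theorem go_zero (s sub : List Char) :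
    PySem.Chars.rfind.go s sub 0 = if sub.isPrefixOf s then 0 else -1 := rfl

theorem go_succ (s sub : List Char) (j : Nat) :
    PySem.Chars.rfind.go s sub (j + 1) =
      if sub.isPrefixOf (s.drop (j + 1)) then ((j : Int) + 1) else PySem.Chars.rfind.go s sub j :=
  rfl

theorem go_le (s sub : List Char) (j : Nat) : PySem.Chars.rfind.go s sub j ≤ j := by
  induction j with
  | zero => rw [go_zero]; split <;> simp
  | succ j ih =>
    rw [go_succ]; split
    · simp
    · exact le_trans ih (by exact_mod_cast Nat.le_succ j)

theorem rfind_singleton_lt (s : List Char) (v : Char) :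
    PySem.Chars.rfind s [v] < (s.length : Int) := by
  show PySem.Chars.rfind.go s [v] s.length < (s.length : Int)
  cases h : s.length with
  | zero =>
    have hs : s = [] := List.length_eq_zero_iff.mp h
    subst hs
    simp [go_zero, List.isPrefixOf]
  | succ n =>
    rw [go_succ]
    rw [show s.drop (n + 1) = [] from List.drop_eq_nil_of_le (by omega)]
    rw [if_neg (by simp [List.isPrefixOf])]
    have := go_le s [v] n
    push_cast
    omega

theorem go_append (s : List Char) (c v : Char) :
    ∀ j, j < s.length →
      PySem.Chars.rfind.go (s ++ [c]) [v] j = PySem.Chars.rfind.go s [v] j := by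
  intro j
  induction j with
  | zero =>
    intro hj
    rw [go_zero, go_zero]
    cases s with
    | nil => simp at hj
    | cons x t => simp [List.isPrefixOf]
  | succ j ih =>
    intro hj
    rw [go_succ, go_succ]
    rw [List.drop_append_of_le_length (by omega : j + 1 ≤ s.length)]
    have h2 : s.drop (j + 1) ≠ [] := by
      simp only [ne_eq, List.drop_eq_nil_iff]; omega
    obtain ⟨x, t, hx⟩ := List.exists_cons_of_ne_nil h2
    rw [hx, List.cons_append]
    simp only [List.isPrefixOf, Bool.and_true]
    rw [ih (by omega)]

theorem rfind_nil (v : Char) : PySem.Chars.rfind [] [v] = -1 := by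
  show PySem.Chars.rfind.go [] [v] 0 = -1
  rw [go_zero, if_neg (by simp [List.isPrefixOf])]

theorem rfind_append_singleton (s : List Char) (c v : Char) :
    PySem.Chars.rfind (s ++ [c]) [v] =
      if c = v then (s.length : Int) else PySem.Chars.rfind s [v] := by
  show PySem.Chars.rfind.go (s ++ [c]) [v] (s ++ [c]).length = _
  have hlen : (s ++ [c]).length = s.length + 1 := by simp
  rw [hlen, go_succ]
  rw [show (s ++ [c]).drop (s.length + 1) = [] from List.drop_eq_nil_of_le (by simp)]
  rw [if_neg (by simp [List.isPrefixOf])]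
  cases hs : s.length with
  | zero =>
    have hnil : s = [] := List.length_eq_zero_iff.mp hs
    subst hnil
    rw [go_zero]
    by_cases hcv : c = v
    · subst hcv; simp [List.isPrefixOf]
    · rw [if_neg (by simp [List.isPrefixOf]; exact fun e => hcv e.symm), if_neg hcv, rfind_nil]
  | succ n =>
    rw [go_succ]
    have hdrop : (s ++ [c]).drop (n + 1) = [c] := by
      rw [List.drop_append_of_le_length (by omega)]
      rw [List.drop_eq_nil_of_le (by omega), List.nil_append]
    rw [hdrop]
    by_cases hcv : c = v
    · subst hcv
      rw [if_pos (by simp [List.isPrefixOf]), if_pos rfl]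
      push_cast; ring
    · rw [if_neg (by simp [List.isPrefixOf]; exact fun e => hcv e.symm), if_neg hcv]
      rw [go_append s c v n (by omega)]
      show _ = PySem.Chars.rfind.go s [v] s.length
      rw [hs, go_succ]
      rw [show s.drop (n + 1) = [] from List.drop_eq_nil_of_le (by omega)]
      rw [if_neg (by simp [List.isPrefixOf])]

theorem vmax_nil : pvVmax [] = -1 := by
  unfold pvVmax
  rw [rfind_nil, rfind_nil, rfind_nil, rfind_nil, rfind_nil]
  rfl

theorem vmax_append (m : List Char) (c : Char) :
    pvVmax (m ++ [c]) = if c ∈ "aeiou".toList then (m.length : Int) else pvVmax m := by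
  have ba := rfind_singleton_lt m 'a'
  have be := rfind_singleton_lt m 'e'
  have bi := rfind_singleton_lt m 'i'
  have bo := rfind_singleton_lt m 'o'
  have bu := rfind_singleton_lt m 'u'
  unfold pvVmax
  rw [rfind_append_singleton, rfind_append_singleton, rfind_append_singleton,
    rfind_append_singleton, rfind_append_singleton]
  by_cases h : c ∈ "aeiou".toList
  · rw [if_pos h]
    have hc : c = 'a' ∨ c = 'e' ∨ c = 'i' ∨ c = 'o' ∨ c = 'u' := by
      have : "aeiou".toList = ['a', 'e', 'i', 'o', 'u'] := rfl
      rw [this] at h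
      simpa using h
    rcases hc with rfl | rfl | rfl | rfl | rfl <;> simp <;> omega
  · have ha : ¬c = 'a' := fun e => h (by rw [e]; decide)
    have he : ¬c = 'e' := fun e => h (by rw [e]; decide)
    have hi : ¬c = 'i' := fun e => h (by rw [e]; decide)
    have ho : ¬c = 'o' := fun e => h (by rw [e]; decide)
    have hu : ¬c = 'u' := fun e => h (by rw [e]; decide)
    rw [if_neg ha, if_neg he, if_neg hi, if_neg ho, if_neg hu, if_neg h]

theorem pvT_append (s : List Char) (c : Char) :
    pvT (s ++ [c]) = if "aeiouAEIOU".toList.contains c then 0 else pvT s + 1 := by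
  unfold pvT
  rw [List.reverse_append, List.reverse_singleton, List.singleton_append, List.takeWhile_cons]
  cases hc : "aeiouAEIOU".toList.contains c
  · simp
  · simp

theorem pvT_le (l : List Char) : pvT l ≤ l.length := by
  unfold pvT
  calc (l.reverse.takeWhile _).length ≤ l.reverse.length :=
        (List.takeWhile_sublist _).length_le
    _ = l.length := List.length_reverse

-- pvVmax of the lowered word is length - pvT - 1 (so -1 exactly when there is no vowel)
theorem vmax_lower (l : List Char) :
    pvVmax (PySem.Chars.lower l) = (l.length : Int) - (pvT l : Int) - 1 := by
  induction l using List.reverseRecOn with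
  | nil => simp [PySem.Chars.lower, pvT, vmax_nil]
  | append_singleton s c ih =>
    have hl : PySem.Chars.lower (s ++ [c]) =
        PySem.Chars.lower s ++ [PySem.Chars.lowerChar c] := by
      simp [PySem.Chars.lower]
    rw [hl, vmax_append, pvT_append]
    have hlenlow : (PySem.Chars.lower s).length = s.length := by
      simp [PySem.Chars.lower]
    by_cases hc : c ∈ "aeiouAEIOU".toList
    · rw [if_pos ((lowerChar_mem c).mpr hc), if_pos (List.contains_iff_mem.mpr hc), hlenlow]
      simp
    · rw [if_neg (fun hm => hc ((lowerChar_mem c).mp hm)),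
        if_neg (fun hb => hc (List.contains_iff_mem.mp hb)), ih]
      push_cast
      simp only [List.length_append, List.length_cons, List.length_nil]
      push_cast
      ring

theorem getElem_idx_congr {α : Type} (xs : List α) {i j : Nat} (hi : i < xs.length)
    (h : i = j) : xs[i] = xs[j]'(h ▸ hi) := by subst h; rfl

-- shifting A's loop over an appended last character
theorem loop_shift (s : List Char) (c : Char) :
    ∀ (k a : Nat) (acc : Int), k + a = s.length →
      lastSylLoop (s ++ [c]) (PySem.List.pyRange ((a : Int) + 1) ((s.length : Int) + 1) 1) acc
        = lastSylLoop s (PySem.List.pyRange (a : Int) (s.length : Int) 1) acc := by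
  intro k
  induction k with
  | zero =>
    intro a acc h
    rw [PySem.List.pyRange_one_eq_nil (by omega), PySem.List.pyRange_one_eq_nil (by omega)]
    rfl
  | succ k ih =>
    intro a acc h
    rw [PySem.List.pyRange_one_cons (by omega : (a : Int) + 1 < (s.length : Int) + 1),
      PySem.List.pyRange_one_cons (by omega : (a : Int) < (s.length : Int))]
    have ha : a < s.length := by omega
    have e1 : PySem.List.pyGetD (s ++ [c]) (-(((a : Int) + 1) + 1)) ' '
        = PySem.List.pyGetD s (-((a : Int) + 1)) ' ' := by
      have h1 : -(((a : Int) + 1) + 1) = -(((a + 2 : Nat) : Int)) := by push_cast; ring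
      have h2 : -((a : Int) + 1) = -(((a + 1 : Nat) : Int)) := by push_cast; ring
      rw [h1, h2,
        PySem.List.pyGetD_neg_natCast (s ++ [c]) (a + 2) ' ' (by omega) (by simp; omega),
        PySem.List.pyGetD_neg_natCast s (a + 1) ' ' (by omega) (by omega)]
      rw [getElem_idx_congr (s ++ [c]) _
        (show (s ++ [c]).length - (a + 2) = s.length - (a + 1) by
          simp only [List.length_append, List.length_cons, List.length_nil]; omega)]
      exact List.getElem_append_left (by omega)
    show (if "aeiouAEIOU".toList.contains
        (PySem.List.pyGetD (s ++ [c]) (-(((a : Int) + 1) + 1)) ' ') then acc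
      else lastSylLoop (s ++ [c])
        (PySem.List.pyRange ((a : Int) + 1 + 1) ((s.length : Int) + 1) 1) (acc + 1)) =
      (if "aeiouAEIOU".toList.contains (PySem.List.pyGetD s (-((a : Int) + 1)) ' ') then acc
      else lastSylLoop s (PySem.List.pyRange ((a : Int) + 1) (s.length : Int) 1) (acc + 1))
    rw [e1]
    cases hdc : "aeiouAEIOU".toList.contains (PySem.List.pyGetD s (-((a : Int) + 1)) ' ')
    · simp only [Bool.false_eq_true, if_false]
      have := ih (a + 1) (acc + 1) (by omega)
      push_cast at this ⊢
      exact this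
    · simp

-- A's loop computes pvT
theorem loop_eq_T (l : List Char) :
    ∀ acc, lastSylLoop l (PySem.List.pyRange 0 ((l.length : Int)) 1) acc
      = acc + (pvT l : Int) := by
  induction l using List.reverseRecOn with
  | nil =>
    intro acc
    simp only [List.length_nil, Nat.cast_zero]
    rw [PySem.List.pyRange_one_eq_nil (le_refl 0)]
    simp [lastSylLoop, pvT]
  | append_singleton s c ih =>
    intro acc
    have hlen : (((s ++ [c]).length : Nat) : Int) = (s.length : Int) + 1 := by
      simp
    rw [hlen, PySem.List.pyRange_one_cons (by omega)]
    show (if "aeiouAEIOU".toList.contains (PySem.List.pyGetD (s ++ [c]) (-(0 + 1)) ' ') then acc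
      else lastSylLoop (s ++ [c]) (PySem.List.pyRange (0 + 1) ((s.length : Int) + 1) 1) (acc + 1))
        = acc + (pvT (s ++ [c]) : Int)
    rw [show (-(0 + 1) : Int) = -1 by ring, PySem.List.pyGetD_neg_one_append_singleton,
      pvT_append]
    cases hc : "aeiouAEIOU".toList.contains c
    · simp only [Bool.false_eq_true, if_false]
      have hshift := loop_shift s c s.length 0 (acc + 1) (by omega)
      push_cast at hshift
      rw [show ((0 : Int) + 1) = 1 by norm_num]
      rw [hshift, ih (acc + 1)]
      push_cast
      ring
    · simp

-- the list-level equality of the two results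
theorem main_list (l : List Char) :
    PySem.Chars.lower (PySem.List.slice l (some (-((pvT l : Int)) - 1)) none)
      = if 0 ≤ pvVmax (PySem.Chars.lower l)
        then PySem.List.slice (PySem.Chars.lower l) (some (pvVmax (PySem.Chars.lower l))) none
        else PySem.Chars.lower l := by
  have hv := vmax_lower l
  have ht := pvT_le l
  have h1 : -((pvT l : Int)) - 1 = -(((pvT l + 1 : Nat)) : Int) := by push_cast; ring
  by_cases hcase : pvT l < l.length
  · rw [if_pos (by rw [hv]; omega)]
    rw [h1, PySem.List.slice_from_neg_natCast l (pvT l + 1) (by omega), hv,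
      PySem.List.slice_from _ (by omega)]
    rw [show ((l.length : Int) - (pvT l : Int) - 1).toNat = l.length - (pvT l + 1) by omega]
    simp [PySem.Chars.lower, List.map_drop]
  · have hteq : pvT l = l.length := by omega
    rw [if_neg (by rw [hv, hteq]; omega)]
    rw [h1, PySem.List.slice_from_neg_natCast l (pvT l + 1) (by omega)]
    rw [show l.length - (pvT l + 1) = 0 by omega, List.drop_zero]

-- ===== VERDICT (by name: the statement is the Claim_ definition above) =====
theorem last_syl_spec : Claim_equal_last_syl := by
  unfold Claim_equal_last_syl Spec_last_syl
  intro word _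
  apply String.toList_inj.mp
  show (PySem.Str.lower (PySem.Str.slice word
      (some (-(lastSylLoop word.toList (PySem.List.pyRange 0 (PySem.Str.len word) 1) 0) - 1))
      none)).toList = _
  have hloop : lastSylLoop word.toList (PySem.List.pyRange 0 (PySem.Str.len word) 1) 0
      = (pvT word.toList : Int) := by
    rw [PySem.Str.len_eq]
    rw [loop_eq_T word.toList 0]
    ring
  rw [hloop]
  have hmax : max (max (max (max (PySem.Str.rfind (PySem.Str.lower word) "a")
      (PySem.Str.rfind (PySem.Str.lower word) "e"))
      (PySem.Str.rfind (PySem.Str.lower word) "i"))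
      (PySem.Str.rfind (PySem.Str.lower word) "o"))
      (PySem.Str.rfind (PySem.Str.lower word) "u")
      = pvVmax (PySem.Chars.lower word.toList) := by
    simp only [PySem.Str.rfind_eq, PySem.Str.toList_lower]
    rfl
  show _ = (if 0 ≤ max (max (max (max (PySem.Str.rfind (PySem.Str.lower word) "a")
      (PySem.Str.rfind (PySem.Str.lower word) "e"))
      (PySem.Str.rfind (PySem.Str.lower word) "i"))
      (PySem.Str.rfind (PySem.Str.lower word) "o"))
      (PySem.Str.rfind (PySem.Str.lower word) "u")
    then PySem.Str.slice (PySem.Str.lower word) (some (max (max (max (max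
      (PySem.Str.rfind (PySem.Str.lower word) "a")
      (PySem.Str.rfind (PySem.Str.lower word) "e"))
      (PySem.Str.rfind (PySem.Str.lower word) "i"))
      (PySem.Str.rfind (PySem.Str.lower word) "o"))
      (PySem.Str.rfind (PySem.Str.lower word) "u"))) none
    else PySem.Str.lower word).toList
  rw [hmax]
  have hmain := main_list word.toList
  by_cases h0 : 0 ≤ pvVmax (PySem.Chars.lower word.toList)
  · rw [if_pos h0]
    rw [if_pos h0] at hmain
    rw [PySem.Str.toList_lower, PySem.Str.toList_slice, PySem.Chars.slice_eq_listSlice]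
    rw [PySem.Str.toList_slice, PySem.Str.toList_lower, PySem.Chars.slice_eq_listSlice]
    exact hmain
  · rw [if_neg h0]
    rw [if_neg h0] at hmain
    rw [PySem.Str.toList_lower, PySem.Str.toList_slice, PySem.Chars.slice_eq_listSlice,
      PySem.Str.toList_lower]
    exact hmain
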